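-- pv_equiv track=rewrite | github.com/Nitroblack1/Study | 삼성 코테준비/2018_상_A_2_L13.py | calculate
-- ===== SOURCE A (Python) =====
-- def calculate(la, lb):
--     s = 0
--     a_i, b_i = 0, 0
--     while a_i < len(la) and b_i < len(lb):
--         if la == lb:
--             return -1
--
--         if la[a_i] < lb[b_i]:
--             s += 1
--             a_i += 1
--         else:
--             s -= 1
--             b_i += 1
--
--     # 남은 거 처리
--     if a_i == len(la):
--         while b_i < len(lb):
--             s -= 1
--             b_i += 1
--     if b_i == len(lb):
--         while a_i < len(la):
--             s += 1
--             a_i += 1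
--
--     # 비대칭량 리턴
--     return s
-- ===== SOURCE B (Python) =====
-- def calculate(la, lb):
--     if la and la == lb:
--         return -1
--     return len(la) - len(lb)
-- ===== Notes on version B (the rewrite author's own statement) =====
-- stated objective: faster
-- what changed: Replaced the merge walk (which re-checks la == lb on every iteration) by a single equality check plus the closed form len(la) - len(lb).
import Mathlib
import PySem

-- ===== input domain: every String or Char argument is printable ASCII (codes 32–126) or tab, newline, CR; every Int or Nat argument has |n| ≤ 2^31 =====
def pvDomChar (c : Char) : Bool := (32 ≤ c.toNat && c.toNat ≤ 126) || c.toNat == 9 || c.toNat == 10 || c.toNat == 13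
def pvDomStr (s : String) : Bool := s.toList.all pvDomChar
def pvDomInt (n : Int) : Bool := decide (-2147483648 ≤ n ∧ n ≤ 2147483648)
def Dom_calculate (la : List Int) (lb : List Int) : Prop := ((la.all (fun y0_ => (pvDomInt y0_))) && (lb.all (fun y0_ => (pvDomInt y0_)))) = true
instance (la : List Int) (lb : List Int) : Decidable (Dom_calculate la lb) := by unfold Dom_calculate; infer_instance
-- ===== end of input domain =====

-- B changes the algorithm (one equality check + closed form instead of a merge walk); return-value equivalence is proved below.
-- ===== PORT A =====
-- while b_i < len(lb): s -= 1; b_i += 1   (returns final s and b_i)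
def calcDrainNeg (s : Int) (i n : Nat) : Int × Nat :=
  if i < n then calcDrainNeg (s - 1) (i + 1) n else (s, i)
termination_by n - i

-- while a_i < len(la): s += 1; a_i += 1   (returns final s and a_i)
def calcDrainPos (s : Int) (i n : Nat) : Int × Nat :=
  if i < n then calcDrainPos (s + 1) (i + 1) n else (s, i)
termination_by n - i

-- the main 'while a_i < len(la) and b_i < len(lb)' loop, then the two leftover loops
def calcLoop (la lb : List Int) (s : Int) (ai bi : Nat) : Int :=
  if hab : ai < la.length ∧ bi < lb.length then
    if la = lb then -1
    else if la[ai]'hab.1 < lb[bi]'hab.2 then calcLoop la lb (s + 1) (ai + 1) bi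
    else calcLoop la lb (s - 1) ai (bi + 1)
  else
    let p1 := if ai = la.length then calcDrainNeg s bi lb.length else (s, bi)
    let p2 := if p1.2 = lb.length then calcDrainPos p1.1 ai la.length else (p1.1, ai)
    p2.1
termination_by (la.length - ai) + (lb.length - bi)
decreasing_by all_goals omega

def calculate (la : List Int) (lb : List Int) : Int := calcLoop la lb 0 0 0

-- ===== PORT B =====
def calculate_alt (la : List Int) (lb : List Int) : Int :=
  if la ≠ [] ∧ la = lb then -1 else (la.length : Int) - (lb.length : Int)

-- ===== PRECONDITION & SPEC =====
def Spec_calculate (la : List Int) (lb : List Int) (out : Int) : Prop := out = calculate_alt la lb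
instance (la : List Int) (lb : List Int) (out : Int) : Decidable (Spec_calculate la lb out) := by unfold Spec_calculate; infer_instance

-- ===== CLAIM (what is proved, stated in full; the proofs are below) =====
def Claim_equal_calculate : Prop := ∀ (la : List Int) (lb : List Int), Dom_calculate la lb → Spec_calculate la lb (calculate la lb)

-- ===== LEMMAS AND PROOFS =====

theorem calcDrainNeg_eq_aux (k : Nat) : ∀ (s : Int) (i n : Nat), i ≤ n → n - i ≤ k →
    calcDrainNeg s i n = (s - ((n : Int) - i), n) := by
  induction k with
  | zero =>
    intro s i n h hk
    have : i = n := by omega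
    subst this
    rw [calcDrainNeg]; simp
  | succ k ih =>
    intro s i n h hk
    rw [calcDrainNeg]
    by_cases hi : i < n
    · simp only [hi, if_true]
      rw [ih (s - 1) (i + 1) n (by omega) (by omega)]
      simp only [Prod.mk.injEq, and_true]
      push_cast; ring
    · simp only [hi, if_false]
      have : i = n := by omega
      subst this; simp

theorem calcDrainNeg_eq (s : Int) (i n : Nat) (h : i ≤ n) :
    calcDrainNeg s i n = (s - ((n : Int) - i), n) :=
  calcDrainNeg_eq_aux (n - i) s i n h (le_refl _)

theorem calcDrainPos_eq_aux (k : Nat) : ∀ (s : Int) (i n : Nat), i ≤ n → n - i ≤ k →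
    calcDrainPos s i n = (s + ((n : Int) - i), n) := by
  induction k with
  | zero =>
    intro s i n h hk
    have : i = n := by omega
    subst this
    rw [calcDrainPos]; simp
  | succ k ih =>
    intro s i n h hk
    rw [calcDrainPos]
    by_cases hi : i < n
    · simp only [hi, if_true]
      rw [ih (s + 1) (i + 1) n (by omega) (by omega)]
      simp only [Prod.mk.injEq, and_true]
      push_cast; ring
    · simp only [hi, if_false]
      have : i = n := by omega
      subst this; simp

theorem calcDrainPos_eq (s : Int) (i n : Nat) (h : i ≤ n) :
    calcDrainPos s i n = (s + ((n : Int) - i), n) :=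
  calcDrainPos_eq_aux (n - i) s i n h (le_refl _)

theorem calcLoop_ne_aux (la lb : List Int) (hne : la ≠ lb) (k : Nat) :
    ∀ (s : Int) (ai bi : Nat), ai ≤ la.length → bi ≤ lb.length →
    (la.length - ai) + (lb.length - bi) ≤ k →
    calcLoop la lb s ai bi = s + ((la.length : Int) - ai) - ((lb.length : Int) - bi) := by
  induction k with
  | zero =>
    intro s ai bi ha hb hk
    have hA : ai = la.length := by omega
    have hB : bi = lb.length := by omega
    subst hA; subst hB
    rw [calcLoop, dif_neg (by omega)]
    simp [calcDrainNeg_eq _ _ _ (le_refl lb.length),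
      calcDrainPos_eq _ _ _ (le_refl la.length)]
  | succ k ih =>
    intro s ai bi ha hb hk
    rw [calcLoop]
    by_cases hab : ai < la.length ∧ bi < lb.length
    · rw [dif_pos hab, if_neg hne]
      by_cases hlt : la[ai]'hab.1 < lb[bi]'hab.2
      · rw [if_pos hlt, ih (s + 1) (ai + 1) bi (by omega) hb (by omega)]
        push_cast; ring
      · rw [if_neg hlt, ih (s - 1) ai (bi + 1) ha (by omega) (by omega)]
        push_cast; ring
    · rw [dif_neg hab]
      by_cases hA : ai = la.length
      · subst hA
        simp [calcDrainNeg_eq s bi lb.length hb,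
          calcDrainPos_eq _ _ _ (le_refl la.length)]
      · have hB : bi = lb.length := by omega
        subst hB
        simp [if_neg hA, calcDrainPos_eq s ai la.length ha]

theorem calcLoop_ne (la lb : List Int) (hne : la ≠ lb) (s : Int) (ai bi : Nat)
    (ha : ai ≤ la.length) (hb : bi ≤ lb.length) :
    calcLoop la lb s ai bi = s + ((la.length : Int) - ai) - ((lb.length : Int) - bi) :=
  calcLoop_ne_aux la lb hne ((la.length - ai) + (lb.length - bi)) s ai bi ha hb (le_refl _)

-- ===== VERDICT (by name: the statement is the Claim_ definition above) =====
theorem calculate_spec : Claim_equal_calculate := by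
  intro la lb _
  unfold Spec_calculate calculate calculate_alt
  by_cases heq : la = lb
  · subst heq
    cases la with
    | nil => simp [calcLoop, calcDrainNeg, calcDrainPos]
    | cons x xs =>
      rw [calcLoop]
      simp
  · rw [calcLoop_ne la lb heq 0 0 0 (by omega) (by omega)]
    simp [heq]
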